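-- pv_equiv track=rewrite | github.com/Phuc3010/Music-Transformers | tokenizer.py | time2duration
-- ===== SOURCE A (Python) =====
-- def time2duration(time: int, ticks_per_beat: int) -> list:
--     all_tick = 2*ticks_per_beat
--     duration_list = []
--     for current_pow in range(5):
--         while time >= all_tick//(1<<current_pow):
--             duration_list.append(1<<current_pow)
--             time -= all_tick//(1<<current_pow)
--     return duration_list
-- ===== SOURCE B (Python) =====
-- def time2duration(time: int, ticks_per_beat: int) -> list:
--     all_tick = 2 * ticks_per_beat
--     duration_list = []
--     for current_pow in range(5):
--         value = all_tick // (1 << current_pow)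
--         count = max(0, time // value)
--         duration_list += [1 << current_pow] * count
--         time -= count * value
--     return duration_list
-- ===== Notes on version B (the rewrite author's own statement) =====
-- stated objective: simpler
-- what changed: Replaces the inner repeated-subtraction while loop with one floor division per power level (count = max(0, time // value)), so each level is a single arithmetic step instead of a loop.
-- outside the precondition, e.g. on time2duration(-5, 1): A returns [], B raises ZeroDivisionError; on time2duration(-100, -10): A returns [], B returns [1, 1, 1, 1, 1]
import Mathlib
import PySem

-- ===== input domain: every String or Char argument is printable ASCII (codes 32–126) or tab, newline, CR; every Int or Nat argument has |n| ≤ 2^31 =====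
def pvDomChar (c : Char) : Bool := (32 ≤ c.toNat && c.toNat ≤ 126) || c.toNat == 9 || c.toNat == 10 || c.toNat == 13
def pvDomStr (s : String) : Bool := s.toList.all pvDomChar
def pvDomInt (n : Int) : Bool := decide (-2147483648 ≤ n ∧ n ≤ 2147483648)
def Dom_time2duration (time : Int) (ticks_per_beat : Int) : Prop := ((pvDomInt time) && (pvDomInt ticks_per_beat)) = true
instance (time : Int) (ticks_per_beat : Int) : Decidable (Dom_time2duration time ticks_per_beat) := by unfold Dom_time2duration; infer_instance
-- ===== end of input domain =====

-- B replaces A's repeated-subtraction inner while loop by one floor division per power level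
-- (same greedy result, constant work per level); equivalence is about the return value only.

-- ===== PORT A =====
-- inner while loop of A: while time >= value: append pw; time -= value
-- (fuel bounds the iterations; under Pre_ the fuel time.toNat + 1 is never exhausted, see loopA_eq)
def loopA (value pw : Int) : Nat → Int → List Int → Int × List Int
  | 0, time, acc => (time, acc)
  | fuel + 1, time, acc =>
    if value ≤ time then loopA value pw fuel (time - value) (acc ++ [pw])
    else (time, acc)

def time2duration (time : Int) (ticks_per_beat : Int) : List Int :=
  let all_tick : Int := 2 * ticks_per_beat
  (((List.range 5).foldl (fun (st : Int × List Int) (p : Nat) =>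
      loopA (PySem.Int.floordiv all_tick ((2 : Int) ^ p)) ((2 : Int) ^ p)
        (st.1.toNat + 1) st.1 st.2) (time, []))).2

-- ===== PORT B =====
def time2duration_alt (time : Int) (ticks_per_beat : Int) : List Int :=
  let all_tick : Int := 2 * ticks_per_beat
  (((List.range 5).foldl (fun (st : Int × List Int) (p : Nat) =>
      let value := PySem.Int.floordiv all_tick ((2 : Int) ^ p)
      let count := max 0 (PySem.Int.floordiv st.1 value)
      (st.1 - count * value, st.2 ++ List.replicate count.toNat ((2 : Int) ^ p))) (time, []))).2

-- ===== PRECONDITION & SPEC =====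
-- Pre_ excludes ticks_per_beat < 8: there some per-level step 2*ticks_per_beat//(1<<p) is ≤ 0, on
-- which A loops forever whenever the remaining time reaches it non-negatively, and the values A does
-- still return (the empty list, reached only for negative inputs) are an artefact of the loop guard;
-- B divides by the step there (ZeroDivisionError for ticks_per_beat with a zero step, or a different
-- list for negative steps).
def Pre_time2duration (time : Int) (ticks_per_beat : Int) : Prop := 8 ≤ ticks_per_beat
instance (time : Int) (ticks_per_beat : Int) : Decidable (Pre_time2duration time ticks_per_beat) := by unfold Pre_time2duration; infer_instance

def pvWitness_time2duration : Int × Int := (100, 8)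

def Spec_time2duration (time : Int) (ticks_per_beat : Int) (out : List Int) : Prop := out = time2duration_alt time ticks_per_beat
instance (time : Int) (ticks_per_beat : Int) (out : List Int) : Decidable (Spec_time2duration time ticks_per_beat out) := by unfold Spec_time2duration; infer_instance

-- ===== CLAIM (what is proved, stated in full; the proofs are below) =====
def Claim_equal_time2duration : Prop := ∀ (time : Int) (ticks_per_beat : Int), Dom_time2duration time ticks_per_beat → Pre_time2duration time ticks_per_beat → Spec_time2duration time ticks_per_beat (time2duration time ticks_per_beat)

-- ===== LEMMAS AND PROOFS =====

-- With a positive step and sufficient fuel, A's repeated subtraction computes exactly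
-- B's division-based step.
theorem loopA_eq (value pw : Int) (hv : 1 ≤ value) :
    ∀ (fuel : Nat) (time : Int) (acc : List Int), time.toNat < fuel →
      loopA value pw fuel time acc =
        (time - max 0 (PySem.Int.floordiv time value) * value,
         acc ++ List.replicate (max 0 (PySem.Int.floordiv time value)).toNat pw) := by
  intro fuel
  induction fuel with
  | zero => intro time acc h; omega
  | succ n ih =>
    intro time acc h
    rw [loopA]
    by_cases hle : value ≤ time
    · simp only [if_pos hle]
      have hfuel : (time - value).toNat < n := by omega
      rw [ih (time - value) (acc ++ [pw]) hfuel]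
      have hq : PySem.Int.floordiv (time - value) value = PySem.Int.floordiv time value - 1 := by
        rw [PySem.Int.floordiv_eq_ediv_of_pos (by omega), PySem.Int.floordiv_eq_ediv_of_pos (by omega)]
        have := Int.add_mul_ediv_right time (-1) (show value ≠ 0 by omega)
        calc (time - value) / value = (time + -1 * value) / value := by ring_nf
          _ = time / value + -1 := this
          _ = time / value - 1 := by ring
      have hq1 : 1 ≤ PySem.Int.floordiv time value := by
        rw [PySem.Int.floordiv_eq_ediv_of_pos (by omega)]
        exact Int.le_ediv_iff_mul_le (by omega) |>.mpr (by omega)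
      have hmax : max 0 (PySem.Int.floordiv time value) = PySem.Int.floordiv time value := by omega
      have hmax' : max 0 (PySem.Int.floordiv (time - value) value) = PySem.Int.floordiv time value - 1 := by
        rw [hq]; omega
      rw [hmax, hmax']
      have htn : (PySem.Int.floordiv time value).toNat = (PySem.Int.floordiv time value - 1).toNat + 1 := by omega
      simp only [Prod.mk.injEq]
      refine ⟨by ring, ?_⟩
      rw [htn, List.replicate_succ]
      simp
    · simp only [if_neg hle]
      have hq0 : PySem.Int.floordiv time value ≤ 0 := by
        rw [PySem.Int.floordiv_eq_ediv_of_pos (by omega)]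
        have : time / value < 1 := Int.ediv_lt_iff_lt_mul (by omega) |>.mpr (by omega)
        omega
      have hmax : max 0 (PySem.Int.floordiv time value) = 0 := by omega
      rw [hmax]
      simp

theorem step_value_pos (ticks_per_beat : Int) (hp : 8 ≤ ticks_per_beat) (p : Nat) (hplt : p < 5) :
    1 ≤ PySem.Int.floordiv (2 * ticks_per_beat) ((2 : Int) ^ p) := by
  have h2 : (0 : Int) < 2 ^ p := by positivity
  rw [PySem.Int.floordiv_eq_ediv_of_pos h2]
  apply Int.le_ediv_iff_mul_le h2 |>.mpr
  have : (2 : Int) ^ p ≤ 2 ^ 4 := by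
    apply pow_le_pow_right₀ (by norm_num) (by omega)
  norm_num at this ⊢
  omega

-- ===== VERDICT (by name: the statement is the Claim_ definition above) =====
theorem time2duration_spec : Claim_equal_time2duration := by
  intro time tpb _ hpre
  unfold Spec_time2duration time2duration time2duration_alt
  refine congrArg Prod.snd ?_
  apply PySem.List.foldl_congr_mem
  intro st p hp
  have hp5 : p < 5 := List.mem_range.mp hp
  exact loopA_eq _ _ (step_value_pos tpb hpre p hp5) _ _ _ (by omega)
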